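-- pv_equiv track=rewrite | github.com/echo01409/Configuration_Extractors | stealc-config-extractor.py | count_before_four_consecutive_4_length
-- ===== SOURCE A (Python) =====
-- def count_before_four_consecutive_4_length(data, length=4, consec=4):
--     c = 0
--     for i, x in enumerate(data):
--         if len(x) == length:
--             c += 1
--             if c == consec:
--                 return i - consec + 1
--         else:
--             c = 0
--     return -1
-- ===== SOURCE B (Python) =====
-- def count_before_four_consecutive_4_length(data, length=4, consec=4):
--     # Run-based scan: jump over maximal runs of length-`length` items.
--     i, n = 0, len(data)
--     while i < n:
--         if len(data[i]) != length:
--             i += 1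
--             continue
--         j = i
--         while j < n and len(data[j]) == length:
--             j += 1
--         if j - i >= consec:
--             return i
--         i = j
--     return -1
-- ===== Notes on version B (the rewrite author's own statement) =====
-- stated objective: alternative
-- what changed: B replaces A's per-element counter with a run-based scan: it finds each maximal run of items of the given length and returns the run's start index as soon as a run of size >= consec is found, jumping past shorter runs.
-- outside the precondition, e.g. on count_before_four_consecutive_4_length(['aaaa'], 4, 0): A returns -1, B returns 0
import Mathlib
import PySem

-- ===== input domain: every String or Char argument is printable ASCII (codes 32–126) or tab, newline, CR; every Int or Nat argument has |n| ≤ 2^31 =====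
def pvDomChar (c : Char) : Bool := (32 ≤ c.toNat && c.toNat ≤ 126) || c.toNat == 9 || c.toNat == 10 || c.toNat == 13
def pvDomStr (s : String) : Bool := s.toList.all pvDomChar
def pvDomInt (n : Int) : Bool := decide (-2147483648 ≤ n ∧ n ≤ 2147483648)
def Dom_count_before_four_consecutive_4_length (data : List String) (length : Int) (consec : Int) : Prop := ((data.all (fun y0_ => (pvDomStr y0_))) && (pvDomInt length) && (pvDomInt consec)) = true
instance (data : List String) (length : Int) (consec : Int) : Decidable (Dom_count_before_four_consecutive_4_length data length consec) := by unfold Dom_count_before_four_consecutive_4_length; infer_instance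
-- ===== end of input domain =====

-- B replaces A's per-element counter with a run-based scan over maximal runs of matching items
-- (alternative decomposition, same cost); proved equal to A whenever consec ≥ 1.


-- ===== PORT A =====
-- A's loop: counter c of consecutive matches, early return when c hits consec.
def cbfGoA (length consec : Int) : List String → Int → Int → Int
  | [], _, _ => -1
  | x :: xs, i, c =>
    if PySem.Str.len x = length then
      if c + 1 = consec then i - consec + 1
      else cbfGoA length consec xs (i + 1) (c + 1)
    else cbfGoA length consec xs (i + 1) 0

def count_before_four_consecutive_4_length (data : List String) (length : Int) (consec : Int) : Int :=
  cbfGoA length consec data 0 0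

-- ===== PORT B =====
-- length of the maximal run of matching items at the head (Source B's inner `while j` scan)
def cbfRun (length : Int) : List String → Nat
  | [] => 0
  | x :: xs => if PySem.Str.len x = length then cbfRun length xs + 1 else 0

-- Source B's outer `while i` loop: skip a non-match, or measure the run and return its start / jump past it
def cbfGoB (length consec : Int) : List String → Int → Int
  | [], _ => -1
  | x :: xs, i =>
    if PySem.Str.len x = length then
      if consec ≤ (cbfRun length (x :: xs) : Int) then i
      else cbfGoB length consec (List.drop (cbfRun length (x :: xs) - 1) xs) (i + (cbfRun length (x :: xs) : Int))
    else cbfGoB length consec xs (i + 1)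
termination_by xs => xs.length
decreasing_by
  · simp [List.length_drop]
  · simp

def count_before_four_consecutive_4_length_alt (data : List String) (length : Int) (consec : Int) : Int :=
  cbfGoB length consec data 0

-- ===== PRECONDITION & SPEC =====
-- Pre_ excludes only the degenerate request consec ≤ 0 on data containing an item of the given
-- length (A still returns): there A's -1 (its counter never reaches a nonpositive target) and B's
-- "a run of ≥ 0 matches starts at its start" are both defensible readings of an unspecified corner.
def Pre_count_before_four_consecutive_4_length (data : List String) (length : Int) (consec : Int) : Prop :=
  1 ≤ consec ∨ ∀ x ∈ data, PySem.Str.len x ≠ length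
instance (data : List String) (length : Int) (consec : Int) : Decidable (Pre_count_before_four_consecutive_4_length data length consec) := by unfold Pre_count_before_four_consecutive_4_length; infer_instance

def pvWitness_count_before_four_consecutive_4_length : List String × Int × Int :=
  (["aaaa", "bbbb", "ab", "cccc", "dddd", "eeee", "ffff", "g"], 4, 4)

def Spec_count_before_four_consecutive_4_length (data : List String) (length : Int) (consec : Int) (out : Int) : Prop := out = count_before_four_consecutive_4_length_alt data length consec
instance (data : List String) (length : Int) (consec : Int) (out : Int) : Decidable (Spec_count_before_four_consecutive_4_length data length consec out) := by unfold Spec_count_before_four_consecutive_4_length; infer_instance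

-- ===== CLAIM (what is proved, stated in full; the proofs are below) =====
def Claim_equal_count_before_four_consecutive_4_length : Prop := ∀ (data : List String) (length : Int) (consec : Int), Dom_count_before_four_consecutive_4_length data length consec → Pre_count_before_four_consecutive_4_length data length consec → Spec_count_before_four_consecutive_4_length data length consec (count_before_four_consecutive_4_length data length consec)

-- ===== LEMMAS AND PROOFS =====

-- A's counter loop, characterised by the head run: if the current maximal run (plus the c matches
-- already counted) reaches consec, A returns the start of that combined run; otherwise it continues
-- after the run with the counter reset.
lemma cbfGoA_run (length consec : Int) :
    ∀ (xs : List String) (i c : Int), 0 ≤ c → c < consec →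
      cbfGoA length consec xs i c =
        if consec - c ≤ (cbfRun length xs : Int) then i - c
        else cbfGoA length consec (List.drop (cbfRun length xs) xs) (i + (cbfRun length xs : Int)) 0 := by
  intro xs
  induction xs with
  | nil =>
      intro i c hc0 hc
      simp only [cbfRun]
      rw [if_neg (by push_cast; omega)]
      simp [cbfGoA]
  | cons x xs ih =>
      intro i c hc0 hc
      by_cases h : ((x.length : Int)) = length
      · have hrun : cbfRun length (x :: xs) = cbfRun length xs + 1 := by simp [cbfRun, h]
        by_cases hcc : c + 1 = consec
        · have hk : consec - c ≤ ((cbfRun length (x :: xs)) : Int) := by rw [hrun]; push_cast; omega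
          rw [if_pos hk]
          simp [cbfGoA, h, hcc]
          omega
        · have hlt : c + 1 < consec := by omega
          have hstep : cbfGoA length consec (x :: xs) i c = cbfGoA length consec xs (i + 1) (c + 1) := by
            simp [cbfGoA, h, hcc]
          rw [hstep, ih (i + 1) (c + 1) (by omega) hlt, hrun]
          by_cases hk : consec - (c + 1) ≤ ((cbfRun length xs) : Int)
          · rw [if_pos hk, if_pos (by push_cast; omega)]
            omega
          · rw [if_neg hk, if_neg (by push_cast; omega)]
            have hdrop : List.drop (cbfRun length xs + 1) (x :: xs) = List.drop (cbfRun length xs) xs := by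
              simp
            rw [hdrop]
            congr 1
            push_cast
            omega
      · have hrun0 : cbfRun length (x :: xs) = 0 := by simp [cbfRun, h]
        rw [hrun0, if_neg (by push_cast; omega)]
        simp [cbfGoA, h]

-- with no matching item at all, both scans fall through to -1 (covers the consec ≤ 0 side of Pre_)
lemma cbfGoA_noMatch (length consec : Int) :
    ∀ (xs : List String) (i c : Int), (∀ x ∈ xs, PySem.Str.len x ≠ length) →
      cbfGoA length consec xs i c = -1 := by
  intro xs
  induction xs with
  | nil => intro i c _; simp [cbfGoA]
  | cons x xs ih =>
      intro i c hno
      have hx : ¬ ((x.length : Int)) = length := by simpa using hno x (by simp)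
      rw [show cbfGoA length consec (x :: xs) i c = cbfGoA length consec xs (i + 1) 0 from by
        simp [cbfGoA, hx]]
      exact ih _ _ (fun y hy => hno y (by simp [hy]))

lemma cbfGoB_noMatch (length consec : Int) :
    ∀ (xs : List String) (i : Int), (∀ x ∈ xs, PySem.Str.len x ≠ length) →
      cbfGoB length consec xs i = -1 := by
  intro xs
  induction xs with
  | nil => intro i _; simp [cbfGoB]
  | cons x xs ih =>
      intro i hno
      have hx : ¬ ((x.length : Int)) = length := by simpa using hno x (by simp)
      rw [cbfGoB, if_neg (by simpa using hx)]
      exact ih _ (fun y hy => hno y (by simp [hy]))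

lemma cbfGo_eq (length consec : Int) (hc : 1 ≤ consec) :
    ∀ (n : Nat) (xs : List String), xs.length ≤ n → ∀ (i : Int),
      cbfGoA length consec xs i 0 = cbfGoB length consec xs i := by
  intro n
  induction n with
  | zero =>
      intro xs hlen i
      have hnil : xs = [] := by cases xs <;> simp_all
      subst hnil
      simp [cbfGoA, cbfGoB]
  | succ n ih =>
      intro xs hlen i
      cases xs with
      | nil => simp [cbfGoA, cbfGoB]
      | cons x xs =>
          by_cases h : ((x.length : Int)) = length
          · have hrun : cbfRun length (x :: xs) = cbfRun length xs + 1 := by simp [cbfRun, h]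
            have hA := cbfGoA_run length consec (x :: xs) i 0 (by omega) (by omega)
            rw [cbfGoB, if_pos (by simpa using h)]
            by_cases hk : consec ≤ ((cbfRun length (x :: xs)) : Int)
            · rw [if_pos hk, hA, if_pos (by omega)]
              omega
            · rw [if_neg hk, hA, if_neg (by omega)]
              have hdrop : List.drop (cbfRun length (x :: xs)) (x :: xs)
                  = List.drop (cbfRun length (x :: xs) - 1) xs := by
                rw [hrun]; simp
              rw [hdrop]
              apply ih
              have hld : (List.drop (cbfRun length (x :: xs) - 1) xs).length ≤ xs.length := by
                simp [List.length_drop]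
              simp at hlen
              omega
          · rw [cbfGoB, if_neg (by simpa using h)]
            rw [show cbfGoA length consec (x :: xs) i 0 = cbfGoA length consec xs (i + 1) 0 from by
              simp [cbfGoA, h]]
            apply ih
            simp at hlen
            omega

-- ===== VERDICT (by name: the statement is the Claim_ definition above) =====
theorem count_before_four_consecutive_4_length_spec : Claim_equal_count_before_four_consecutive_4_length := by
  intro data length consec _ hpre
  unfold Spec_count_before_four_consecutive_4_length
  unfold count_before_four_consecutive_4_length count_before_four_consecutive_4_length_alt
  rcases hpre with hc | hno
  · exact cbfGo_eq length consec hc data.length data (le_refl _) 0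
  · rw [cbfGoA_noMatch length consec data 0 0 hno, cbfGoB_noMatch length consec data 0 hno]
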